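-- pv_equiv track=rewrite | github.com/UBCSE-ngupta22/CSE531_PP1 | 1_Gupta_Nikhil_50534276.py | bfs
-- ===== SOURCE A (Python) =====
-- from collections import deque
--
-- def bfs(graph, startVertex):
--     visited = set()
--     queue = deque()
--     queue.append(startVertex)
--     visited.add(startVertex)
--     d={}
--     d[startVertex] = 0
--     bfsOrder = []
--
--     while queue:
--         vertex = queue.popleft()
--         bfsOrder.append(vertex)
--
--         for vertexes in graph[vertex]:
--             if vertexes not in visited:
--                 d[vertexes] = 1 if d[vertex]==0 else 0
--                 visited.add(vertexes)
--                 queue.append(vertexes)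
--
--     return bfsOrder, d
-- ===== SOURCE B (Python) =====
-- def bfs(graph, startVertex):
--     # Phase 1: collect the BFS layers (no queue, no colouring yet).
--     seen = {startVertex}
--     frontier = [startVertex]
--     layers = []
--     while frontier:
--         layers.append(frontier)
--         nxt = []
--         for v in frontier:
--             for w in graph[v]:
--                 if w not in seen:
--                     seen.add(w)
--                     nxt.append(w)
--         frontier = nxt
--     # Phase 2: derive both outputs from the layers.
--     bfsOrder = [v for layer in layers for v in layer]
--     d = {v: i % 2 for i, layer in enumerate(layers) for v in layer}
--     return bfsOrder, d
-- ===== Notes on version B (the rewrite author's own statement) =====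
-- stated objective: alternative
-- what changed: Replaces the deque-driven single-pass BFS by a two-phase computation: first a level-synchronous loop that only collects the list of BFS layers (no queue, no dict), then the order and the 2-coloring are derived from the layers by comprehensions, the colour being the layer index mod 2 instead of a per-node flip of the parent's stored colour.
import Mathlib
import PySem

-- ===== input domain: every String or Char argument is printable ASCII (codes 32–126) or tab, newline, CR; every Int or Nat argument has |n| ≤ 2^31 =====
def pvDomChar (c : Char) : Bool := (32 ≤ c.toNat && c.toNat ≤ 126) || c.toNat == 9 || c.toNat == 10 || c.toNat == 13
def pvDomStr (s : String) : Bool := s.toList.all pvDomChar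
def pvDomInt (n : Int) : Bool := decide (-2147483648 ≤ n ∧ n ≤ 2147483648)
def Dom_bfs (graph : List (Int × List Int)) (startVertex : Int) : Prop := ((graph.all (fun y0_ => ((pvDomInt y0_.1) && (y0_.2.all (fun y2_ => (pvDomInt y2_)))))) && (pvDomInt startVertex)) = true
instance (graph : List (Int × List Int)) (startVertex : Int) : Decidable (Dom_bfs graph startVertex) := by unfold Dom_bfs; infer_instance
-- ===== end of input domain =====

-- ===== PORT A =====
-- B changes the decomposition: a level-synchronous loop first collects the BFS layers only, then the
-- order and the 2-coloring are derived from the layers (colour = layer index mod 2), instead of A's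
-- deque-driven single pass that flips the dequeued node's stored colour.  Pre_bfs excludes the
-- KeyError inputs, so the getD defaults below are never consulted on admitted inputs.

-- graph[v]; the default [] is only reached where Python would raise KeyError (excluded by Pre_bfs)
def pvAdj (graph : List (Int × List Int)) (v : Int) : List Int :=
  (PySem.Dict.mk graph).getD v []

-- body of A's inner 'for vertexes in graph[vertex]' loop; state = (visited, d, queue);
-- 'd[vertex]' is ported as getD with default 0, which is exact: every queued vertex was assigned in d
def pvStepA (v : Int) (s : PySem.Set Int × PySem.Dict Int Int × List Int) (w : Int) :
    PySem.Set Int × PySem.Dict Int Int × List Int :=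
  if PySem.Set.contains s.1 w then s
  else (PySem.Set.add s.1 w, s.2.1.insert w (if s.2.1.getD v 0 == 0 then 1 else 0), s.2.2 ++ [w])

-- A's 'while queue' loop; the fuel only makes it total and never runs out:
-- #pops = #enqueues ≤ 1 + total adjacency length < the fuel passed by bfs
def pvLoopA (graph : List (Int × List Int)) :
    Nat → List Int → PySem.Set Int → PySem.Dict Int Int → List Int → List Int × (List (Int × Int))
  | 0, _, _, d, ord => (ord, d.items)
  | _ + 1, [], _, d, ord => (ord, d.items)
  | fuel + 1, v :: rest, vis, d, ord =>
      let s := (pvAdj graph v).foldl (pvStepA v) (vis, d, rest)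
      pvLoopA graph fuel s.2.2 s.1 s.2.1 (ord ++ [v])

def bfs (graph : List (Int × List Int)) (startVertex : Int) : List Int × (List (Int × Int)) :=
  pvLoopA graph (2 + (graph.flatMap Prod.snd).length) [startVertex]
    (PySem.Set.add PySem.Set.empty startVertex) (PySem.Dict.empty.insert startVertex 0) []

-- ===== PORT B =====
-- body of B's inner 'for w in graph[v]' loop; state = (seen, nxt)
def pvSeenStep (t : PySem.Set Int × List Int) (w : Int) : PySem.Set Int × List Int :=
  if PySem.Set.contains t.1 w then t else (PySem.Set.add t.1 w, t.2 ++ [w])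

-- body of B's 'for v in frontier' loop
def pvScanNode (graph : List (Int × List Int)) (t : PySem.Set Int × List Int) (v : Int) :
    PySem.Set Int × List Int :=
  (pvAdj graph v).foldl pvSeenStep t  -- graph[v], the same lookup helper as A's

-- B's phase-1 'while frontier' loop, returning the list of layers; the fuel only makes it
-- total and never runs out (#levels ≤ 1 + total adjacency length)
def pvLayers (graph : List (Int × List Int)) :
    Nat → List Int → PySem.Set Int → List (List Int)
  | 0, _, _ => []
  | _ + 1, [], _ => []
  | fuel + 1, v :: rest, seen =>
      let t := (v :: rest).foldl (pvScanNode graph) (seen, [])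
      (v :: rest) :: pvLayers graph fuel t.2 t.1

-- phase 2: '[v for layer in layers for v in layer]' and '{v: i % 2 for i, layer in enumerate(layers) for v in layer}'
def bfs_alt (graph : List (Int × List Int)) (startVertex : Int) : List Int × (List (Int × Int)) :=
  let layers := pvLayers graph (2 + (graph.flatMap Prod.snd).length) [startVertex]
      (PySem.Set.add PySem.Set.empty startVertex)
  (layers.flatMap (fun layer => layer),
   ((PySem.List.enumerate layers).foldl
      (fun d p => p.2.foldl (fun d v => d.insert v (PySem.Int.mod p.1 2)) d)
      PySem.Dict.empty).items)

-- ===== PRECONDITION & SPEC =====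
-- Pre_bfs excludes exactly the inputs where the Python raises KeyError: A (and B) evaluate graph[vertex]
-- for every vertex reachable from startVertex, so both return normally iff every reachable vertex is a key.
-- pvReach is the set of vertices reachable from startVertex (one edge-expansion per round; graph.length
-- rounds suffice, since a shortest path passes through distinct keys).
def pvReachStep (graph : List (Int × List Int)) (S : List Int) : List Int :=
  (S ++ S.flatMap (fun v => (PySem.Dict.mk graph).getD v [])).dedup

def pvReach (graph : List (Int × List Int)) (startVertex : Int) : List Int :=
  (pvReachStep graph)^[graph.length] [startVertex]

def Pre_bfs (graph : List (Int × List Int)) (startVertex : Int) : Prop :=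
  ∀ v ∈ pvReach graph startVertex, v ∈ graph.map Prod.fst
instance (graph : List (Int × List Int)) (startVertex : Int) : Decidable (Pre_bfs graph startVertex) := by
  unfold Pre_bfs; infer_instance

def pvWitness_bfs : (List (Int × List Int)) × Int := ([(0, [1, 2]), (1, [2]), (2, [0])], 0)

def Spec_bfs (graph : List (Int × List Int)) (startVertex : Int) (out : List Int × (List (Int × Int))) : Prop := out = bfs_alt graph startVertex
instance (graph : List (Int × List Int)) (startVertex : Int) (out : List Int × (List (Int × Int))) : Decidable (Spec_bfs graph startVertex out) := by unfold Spec_bfs; infer_instance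

-- ===== CLAIM (what is proved, stated in full; the proofs are below) =====
def Claim_equal_bfs : Prop := ∀ (graph : List (Int × List Int)) (startVertex : Int), Dom_bfs graph startVertex → Pre_bfs graph startVertex → Spec_bfs graph startVertex (bfs graph startVertex)

-- ===== LEMMAS AND PROOFS =====

-- neighbours always lie in the adjacency lists of graph
lemma pvAdj_sub (graph : List (Int × List Int)) (v w : Int) (h : w ∈ pvAdj graph v) :
    w ∈ graph.flatMap Prod.snd := by
  induction graph with
  | nil => simp [pvAdj, PySem.Dict.getD, PySem.Dict.get?] at h
  | cons p rest ih =>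
    rw [pvAdj, PySem.Dict.getD_eq_get?_getD, PySem.Dict.get?_mk_cons] at h
    by_cases hp : p.1 == v
    · simp [hp] at h
      rw [List.mem_flatMap]
      exact ⟨p, by simp, h⟩
    · simp [hp] at h
      rw [← PySem.Dict.getD_eq_get?_getD, ← pvAdj] at h
      simpa using Or.inr (ih h)

-- the colour A inserts equals the next level's parity when v's stored colour is the level parity
lemma color_eq (lvl : Int) :
    (if (PySem.Int.mod lvl 2 == 0) then (1 : Int) else 0) = PySem.Int.mod (lvl + 1) 2 := by
  rw [PySem.Int.mod_eq_emod_of_pos (b := 2) (by norm_num) (a := lvl),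
      PySem.Int.mod_eq_emod_of_pos (b := 2) (by norm_num) (a := lvl + 1)]
  by_cases h : lvl % 2 = 0
  · simp [h]; omega
  · simp [h]; omega

-- an insert-loop over keys avoiding x leaves x's lookup alone
lemma getD_fold_pres (c : Int) :
    ∀ (l : List Int) (d : PySem.Dict Int Int) (x : Int), x ∉ l →
    (l.foldl (fun d w => d.insert w c) d).getD x 0 = d.getD x 0 := by
  intro l
  induction l with
  | nil => intro d x _; rfl
  | cons w l ih =>
    intro d x hx
    simp only [List.foldl_cons]
    rw [ih _ x (fun h => hx (by simp [h]))]
    exact PySem.Dict.getD_insert_of_ne d c 0 (fun h => hx (by simp [h]))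

-- an insert-loop over distinct keys gives each of them the inserted value
lemma getD_fold_mem (c : Int) :
    ∀ (l : List Int) (d : PySem.Dict Int Int) (x : Int), l.Nodup → x ∈ l →
    (l.foldl (fun d w => d.insert w c) d).getD x 0 = c := by
  intro l
  induction l with
  | nil => intro d x _ hx; simp at hx
  | cons w l ih =>
    intro d x hnd hx
    simp only [List.foldl_cons]
    rcases List.mem_cons.mp hx with h | h
    · subst h
      rw [getD_fold_pres c l _ x (List.nodup_cons.mp hnd).1]
      exact PySem.Dict.getD_insert_self d x c 0
    · exact ih _ x (List.nodup_cons.mp hnd).2 h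

-- keys after an insert-loop come from the old dict or the loop's list
lemma mem_keys_fold (c : Int) :
    ∀ (l : List Int) (d : PySem.Dict Int Int) (k : Int),
    k ∈ (l.foldl (fun d w => d.insert w c) d).keys → k ∈ d.keys ∨ k ∈ l := by
  intro l
  induction l with
  | nil => intro d k h; exact Or.inl h
  | cons w l ih =>
    intro d k h
    rcases ih _ k h with h' | h'
    · rcases (PySem.Dict.mem_keys_insert d w k c).mp h' with h'' | h''
      · exact Or.inr (by simp [h''])
      · exact Or.inl h''
    · exact Or.inr (by simp [h'])

-- A's adjacency fold: the discovered vertices 'news' are fresh, the dict grows by a constant-colour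
-- insert-loop over news, and news is appended to both visited and the queue
lemma innerA (graph : List (Int × List Int)) (i v : Int) :
    ∀ (adj : List Int) (vis : PySem.Set Int) (d : PySem.Dict Int Int) (q : List Int),
    (∀ w ∈ adj, w ∈ graph.flatMap Prod.snd) →
    v ∈ vis →
    d.getD v 0 = PySem.Int.mod i 2 →
    vis.Nodup →
    ∃ news,
      adj.foldl (pvStepA v) (vis, d, q) =
        (vis ++ news, news.foldl (fun d w => d.insert w (PySem.Int.mod (i + 1) 2)) d, q ++ news) ∧
      (∀ w ∈ news, w ∉ vis ∧ w ∈ graph.flatMap Prod.snd) ∧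
      (vis ++ news).Nodup := by
  intro adj
  induction adj with
  | nil =>
    intro vis d q _ _ _ hnd
    exact ⟨[], by simp, by simp, by simpa⟩
  | cons y adj ih =>
    intro vis d q hadj hvv hv hnd
    by_cases hy : PySem.Set.contains vis y
    · simp only [List.foldl_cons, pvStepA, hy, if_pos]
      exact ih vis d q (fun u hu => hadj u (by simp [hu])) hvv hv hnd
    · have hym : y ∉ vis := fun hm => hy ((PySem.Set.contains_iff vis y).mpr hm)
      have hvne : v ≠ y := fun he => hym (he ▸ hvv)
      have hcol : d.insert y (if d.getD v 0 == 0 then 1 else 0)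
          = d.insert y (PySem.Int.mod (i + 1) 2) := by rw [hv, color_eq]
      simp only [List.foldl_cons, pvStepA, hy, if_neg, Bool.not_eq_true, hcol]
      have hadd : PySem.Set.add vis y = vis ++ [y] := PySem.Set.add_of_not_mem hym
      rw [hadd]
      obtain ⟨news, e1, e2, e3⟩ :=
        ih (vis ++ [y]) (d.insert y (PySem.Int.mod (i + 1) 2)) (q ++ [y])
          (fun u hu => hadj u (by simp [hu]))
          (by simp [hvv])
          (by rw [PySem.Dict.getD_insert_of_ne d _ 0 hvne]; exact hv)
          (by
            simp only [List.nodup_append, hnd, true_and]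
            refine ⟨List.nodup_singleton y, ?_⟩
            intro a ha b hb he
            rw [List.mem_singleton] at hb
            exact hym ((he.trans hb) ▸ ha))
      refine ⟨y :: news, ?_, ?_, ?_⟩
      · rw [e1]; simp
      · intro w hw
        rcases List.mem_cons.mp hw with h | h
        · rw [h]; exact ⟨hym, hadj y (by simp)⟩
        · obtain ⟨h1, h2⟩ := e2 w h
          exact ⟨fun hm => h1 (by simp [hm]), h2⟩
      · simpa using e3

-- the (visited, queue) components of A's adjacency fold do not depend on the dict and are
-- exactly B's inner scan
lemma innerProj (v : Int) :
    ∀ (adj : List Int) (vis : PySem.Set Int) (d : PySem.Dict Int Int) (q : List Int),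
    ((adj.foldl (pvStepA v) (vis, d, q)).1, (adj.foldl (pvStepA v) (vis, d, q)).2.2)
      = adj.foldl pvSeenStep (vis, q) := by
  intro adj
  induction adj with
  | nil => intro vis d q; rfl
  | cons y adj ih =>
    intro vis d q
    simp only [List.foldl_cons, pvStepA, pvSeenStep]
    by_cases hy : PySem.Set.contains vis y
    · simp only [hy, if_pos]; exact ih vis d q
    · simp only [hy, if_neg, Bool.not_eq_true]; exact ih _ _ _

-- A's whole-frontier expansion (what popping all of f amounts to)
def pvExpandA (graph : List (Int × List Int)) (f : List Int)
    (s : PySem.Set Int × PySem.Dict Int Int × List Int) : PySem.Set Int × PySem.Dict Int Int × List Int :=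
  f.foldl (fun s v => (pvAdj graph v).foldl (pvStepA v) s) s

-- whole-frontier version of innerA
lemma levelA (graph : List (Int × List Int)) (i : Int) :
    ∀ (f : List Int) (vis : PySem.Set Int) (d : PySem.Dict Int Int) (q : List Int),
    (∀ v ∈ f, v ∈ vis ∧ d.getD v 0 = PySem.Int.mod i 2) →
    vis.Nodup →
    ∃ news,
      pvExpandA graph f (vis, d, q) =
        (vis ++ news, news.foldl (fun d w => d.insert w (PySem.Int.mod (i + 1) 2)) d, q ++ news) ∧
      (∀ w ∈ news, w ∉ vis ∧ w ∈ graph.flatMap Prod.snd) ∧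
      (vis ++ news).Nodup := by
  intro f
  induction f with
  | nil =>
    intro vis d q _ hnd
    exact ⟨[], by simp [pvExpandA], by simp, by simpa⟩
  | cons v f ih =>
    intro vis d q hf hnd
    obtain ⟨news1, e1, e2, e3⟩ :=
      innerA graph i v (pvAdj graph v) vis d q (fun w hw => pvAdj_sub graph v w hw)
        (hf v (by simp)).1 (hf v (by simp)).2 hnd
    obtain ⟨news2, g1, g2, g3⟩ :=
      ih (vis ++ news1) (news1.foldl (fun d w => d.insert w (PySem.Int.mod (i + 1) 2)) d)
        (q ++ news1)
        (by
          intro u hu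
          refine ⟨by simp [(hf u (by simp [hu])).1], ?_⟩
          rw [getD_fold_pres _ news1 d u (fun hm => (e2 u hm).1 (hf u (by simp [hu])).1)]
          exact (hf u (by simp [hu])).2)
        e3
    refine ⟨news1 ++ news2, ?_, ?_, ?_⟩
    · show pvExpandA graph f ((pvAdj graph v).foldl (pvStepA v) (vis, d, q)) = _
      rw [e1, g1, List.foldl_append]
      simp
    · intro w hw
      rcases List.mem_append.mp hw with h | h
      · exact e2 w h
      · obtain ⟨h1, h2⟩ := g2 w h
        exact ⟨fun hm => h1 (by simp [hm]), h2⟩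
    · rw [← List.append_assoc]; exact g3

-- B's frontier scan is the (seen, nxt) projection of A's expansion
lemma levelProj (graph : List (Int × List Int)) :
    ∀ (f : List Int) (vis : PySem.Set Int) (d : PySem.Dict Int Int) (q : List Int),
    f.foldl (pvScanNode graph) (vis, q)
      = ((pvExpandA graph f (vis, d, q)).1, (pvExpandA graph f (vis, d, q)).2.2) := by
  intro f
  induction f with
  | nil => intro vis d q; rfl
  | cons v f ih =>
    intro vis d q
    simp only [List.foldl_cons, pvScanNode]
    rw [← innerProj v (pvAdj graph v) vis d q]
    rcases h : (pvAdj graph v).foldl (pvStepA v) (vis, d, q) with ⟨tv, td, tq⟩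
    have : pvExpandA graph (v :: f) (vis, d, q) = pvExpandA graph f (tv, td, tq) := by
      simp [pvExpandA, h]
    rw [this]
    exact ih tv td tq

-- the queue component of A's inner fold is append-only, so a queue prefix factors out
lemma stepA_fold_queue (v : Int) (adj : List Int) :
    ∀ (vis : PySem.Set Int) (d : PySem.Dict Int Int) (q1 q2 : List Int),
    adj.foldl (pvStepA v) (vis, d, q1 ++ q2) =
      ((adj.foldl (pvStepA v) (vis, d, q2)).1, (adj.foldl (pvStepA v) (vis, d, q2)).2.1,
        q1 ++ (adj.foldl (pvStepA v) (vis, d, q2)).2.2) := by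
  induction adj with
  | nil => intro vis d q1 q2; simp
  | cons w adj ih =>
    intro vis d q1 q2
    simp only [List.foldl_cons]
    by_cases hw : PySem.Set.contains vis w
    · simp only [pvStepA, hw, if_pos]
      exact ih vis d q1 q2
    · simp only [pvStepA, hw, if_neg, Bool.not_eq_true]
      simp only [List.append_assoc]
      exact ih _ _ q1 (q2 ++ [w])

-- A's loop on queue f ++ n: pop all of f, collecting the expansion, then continue on the grown n
lemma loopA_frontier (graph : List (Int × List Int)) (f : List Int) :
    ∀ (n : List Int) (vis : PySem.Set Int) (d : PySem.Dict Int Int) (ord : List Int) (fuel : Nat),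
    pvLoopA graph (f.length + fuel) (f ++ n) vis d ord =
      pvLoopA graph fuel (pvExpandA graph f (vis, d, n)).2.2 (pvExpandA graph f (vis, d, n)).1
        (pvExpandA graph f (vis, d, n)).2.1 (ord ++ f) := by
  induction f with
  | nil => intro n vis d ord fuel; simp [pvExpandA]
  | cons v f ih =>
    intro n vis d ord fuel
    have hq := stepA_fold_queue v (pvAdj graph v) vis d f n
    simp only [List.length_cons, List.cons_append]
    have he : f.length + 1 + fuel = (f.length + fuel) + 1 := by omega
    rw [he, pvLoopA]
    simp only [hq]
    rw [ih ((pvAdj graph v).foldl (pvStepA v) (vis, d, n)).2.2]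
    have hexp : pvExpandA graph (v :: f) (vis, d, n) =
        pvExpandA graph f ((pvAdj graph v).foldl (pvStepA v) (vis, d, n)) := by
      simp [pvExpandA]
    rw [hexp]
    simp

-- B's phase-2 dict comprehension, peeled one layer at a time starting at index i
def pvFillFrom (d : PySem.Dict Int Int) (i : Int) : List (List Int) → PySem.Dict Int Int
  | [] => d
  | l :: ls => pvFillFrom (l.foldl (fun d v => d.insert v (PySem.Int.mod i 2)) d) (i + 1) ls

lemma enumFill :
    ∀ (xs : List (List Int)) (s : Int) (d : PySem.Dict Int Int),
    (PySem.List.enumerate xs s).foldl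
        (fun d p => p.2.foldl (fun d v => d.insert v (PySem.Int.mod p.1 2)) d) d
      = pvFillFrom d s xs := by
  intro xs
  induction xs with
  | nil => intro s d; simp [PySem.List.enumerate_nil, pvFillFrom]
  | cons l ls ih =>
    intro s d
    rw [PySem.List.enumerate_cons, List.foldl_cons, pvFillFrom, ih]

lemma pvLayers_nil (graph : List (Int × List Int)) (fuel : Nat) (seen : PySem.Set Int) :
    pvLayers graph fuel [] seen = [] := by
  cases fuel <;> rfl

-- the finite universe every enqueued vertex lives in, and the count of its not-yet-visited members
def pvU (graph : List (Int × List Int)) (startVertex : Int) : List Int :=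
  (startVertex :: graph.flatMap Prod.snd).dedup

def pvMu (graph : List (Int × List Int)) (startVertex : Int) (vis : List Int) : Nat :=
  ((pvU graph startVertex).filter (fun x => decide (x ∉ vis))).length

-- removing one satisfying element of a Nodup list from a filter predicate drops the count by one
lemma filter_length_drop (w : Int) (p q : Int → Bool) :
    ∀ (U : List Int), U.Nodup → w ∈ U → p w = true → q w = false → (∀ x, x ≠ w → p x = q x) →
    (U.filter p).length = (U.filter q).length + 1 := by
  intro U hU hw hp hq hag
  induction U with
  | nil => simp at hw
  | cons u U ih =>
    rcases List.mem_cons.mp hw with h | h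
    · subst h
      have hrest : U.filter p = U.filter q := by
        apply List.filter_congr
        intro x hx
        exact hag x (fun he => (List.nodup_cons.mp hU).1 (he ▸ hx))
      simp [hp, hq, hrest]
    · have hne : u ≠ w := fun he => (List.nodup_cons.mp hU).1 (he ▸ h)
      have := ih (List.nodup_cons.mp hU).2 h
      simp only [List.filter_cons, hag u hne]
      cases hqu : q u <;> simp [this]

lemma mu_append (graph : List (Int × List Int)) (startVertex : Int) :
    ∀ (news vis : List Int), news.Nodup → (∀ w ∈ news, w ∉ vis) →
    (∀ w ∈ news, w ∈ graph.flatMap Prod.snd) →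
    pvMu graph startVertex vis = pvMu graph startVertex (vis ++ news) + news.length := by
  intro news
  induction news with
  | nil => intro vis _ _ _; simp [pvMu]
  | cons w news ih =>
    intro vis hn hd hu
    have h1 : pvMu graph startVertex vis = pvMu graph startVertex (vis ++ [w]) + 1 := by
      apply filter_length_drop w
      · exact List.nodup_dedup _
      · exact List.mem_dedup.mpr (List.mem_cons.mpr (Or.inr (hu w (by simp))))
      · simp [hd w (by simp)]
      · simp
      · intro x hx; simp [hx]
    have h2 := ih (vis ++ [w]) (List.nodup_cons.mp hn).2
      (by
        intro u hu'
        simp only [List.mem_append, List.mem_singleton]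
        rintro (h | h)
        · exact hd u (by simp [hu']) h
        · exact (List.nodup_cons.mp hn).1 (h ▸ hu'))
      (fun u hu' => hu u (by simp [hu']))
    rw [h1, h2]
    simp [List.append_assoc]
    omega

-- the simulation: A's queue loop produces exactly the flattening of B's layers and the dict that
-- B's phase 2 fills in from the remaining layers
lemma sim (graph : List (Int × List Int)) (startVertex : Int) :
    ∀ (fuelB : Nat) (f : List Int) (vis : PySem.Set Int) (d : PySem.Dict Int Int)
      (ord : List Int) (i : Int) (fuelA : Nat),
    (∀ v ∈ f, v ∈ vis ∧ d.getD v 0 = PySem.Int.mod i 2) →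
    (∀ k ∈ d.keys, k ∈ vis) →
    vis.Nodup →
    pvMu graph startVertex vis < fuelB →
    f.length + pvMu graph startVertex vis ≤ fuelA →
    pvLoopA graph fuelA f vis d ord =
      (ord ++ ((pvLayers graph fuelB f vis).flatMap (fun layer => layer)),
       (pvFillFrom d (i + 1) ((pvLayers graph fuelB f vis).drop 1)).items) := by
  intro fuelB
  induction fuelB with
  | zero => intro f vis d ord i fuelA _ _ _ hmu _; omega
  | succ fuelB ih =>
    intro f vis d ord i fuelA hf hkeys hnd hmu hfa
    cases f with
    | nil =>
      rw [pvLayers_nil]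
      cases fuelA <;> simp [pvLoopA, pvFillFrom]
    | cons v f' =>
      obtain ⟨news, e1, e2, e3⟩ := levelA graph i (v :: f') vis d [] hf hnd
      simp only [List.nil_append] at e1
      have hproj := levelProj graph (v :: f') vis d []
      have hlay : pvLayers graph (fuelB + 1) (v :: f') vis =
          (v :: f') :: pvLayers graph fuelB news (vis ++ news) := by
        rw [pvLayers]
        simp only [hproj, e1]
      set d1 := news.foldl (fun d w => d.insert w (PySem.Int.mod (i + 1) 2)) d with hd1
      have hA : pvLoopA graph fuelA (v :: f') vis d ord =
          pvLoopA graph (fuelA - (v :: f').length) news (vis ++ news) d1 (ord ++ (v :: f')) := by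
        have hlen : (v :: f').length + (fuelA - (v :: f').length) = fuelA := by
          have := hfa; simp only [List.length_cons] at *; omega
        conv_lhs => rw [← hlen]
        have := loopA_frontier graph (v :: f') [] vis d ord (fuelA - (v :: f').length)
        simp only [List.append_nil] at this
        rw [this, e1]
      have hmu2 := mu_append graph startVertex news vis
        (List.nodup_append.mp e3).2.1 (fun w hw => (e2 w hw).1) (fun w hw => (e2 w hw).2)
      rw [hA, hlay]
      cases news with
      | nil =>
        rw [pvLayers_nil]
        simp only [List.drop_one, List.tail_cons]
        cases (fuelA - (v :: f').length) <;> simp [pvLoopA, pvFillFrom, hd1]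
      | cons w ws =>
        have hrec := ih (w :: ws) (vis ++ w :: ws) d1 (ord ++ (v :: f')) (i + 1)
          (fuelA - (v :: f').length)
          (by
            intro u hu
            refine ⟨by simp [hu], ?_⟩
            rw [hd1]
            exact getD_fold_mem _ _ d u (List.nodup_append.mp e3).2.1 hu)
          (by
            intro k hk
            rcases mem_keys_fold _ (w :: ws) d k (hd1 ▸ hk) with h | h
            · simp [hkeys k h]
            · simp [h])
          e3
          (by simp only [List.length_cons] at hmu2 ⊢; omega)
          (by simp only [List.length_cons] at hmu2 hfa ⊢; omega)
        rw [hrec]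
        cases fuelB with
        | zero =>
          exfalso
          simp only [List.length_cons] at hmu2
          omega
        | succ fb =>
          rw [pvLayers]
          simp [pvFillFrom, hd1]

theorem bfs_eq (graph : List (Int × List Int)) (startVertex : Int) :
    bfs graph startVertex = bfs_alt graph startVertex := by
  have hvis : PySem.Set.add PySem.Set.empty startVertex = [startVertex] := rfl
  have hmu : pvMu graph startVertex [startVertex] ≤ (graph.flatMap Prod.snd).length + 1 := by
    calc pvMu graph startVertex [startVertex] ≤ (pvU graph startVertex).length :=
          List.length_filter_le _ _
      _ ≤ (startVertex :: graph.flatMap Prod.snd).length := (List.dedup_sublist _).length_le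
      _ = (graph.flatMap Prod.snd).length + 1 := by simp
  have hsim := sim graph startVertex (2 + (graph.flatMap Prod.snd).length) [startVertex]
    [startVertex] (PySem.Dict.empty.insert startVertex 0) [] 0
    (2 + (graph.flatMap Prod.snd).length)
    (by
      intro v hv
      simp only [List.mem_singleton] at hv
      subst hv
      refine ⟨by simp, ?_⟩
      rw [PySem.Dict.getD_insert_self]
      rw [PySem.Int.mod_eq_emod_of_pos (b := 2) (by norm_num) (a := 0)]
      norm_num)
    (by
      intro k hk
      rcases (PySem.Dict.mem_keys_insert _ _ _ _).mp hk with h | h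
      · simp [h]
      · simp [PySem.Dict.keys_empty] at h)
    (by simp)
    (by omega)
    (by simp only [List.length_singleton]; omega)
  rw [bfs]
  simp only [bfs_alt]
  rw [hvis, hsim, enumFill]
  have hlay : pvLayers graph (2 + (graph.flatMap Prod.snd).length) [startVertex] [startVertex] =
      [startVertex] :: pvLayers graph (1 + (graph.flatMap Prod.snd).length)
        ([startVertex].foldl (pvScanNode graph) ([startVertex], [])).2
        ([startVertex].foldl (pvScanNode graph) ([startVertex], [])).1 := by
    rw [show 2 + (graph.flatMap Prod.snd).length = (1 + (graph.flatMap Prod.snd).length) + 1 by omega]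
    rw [pvLayers]
  rw [hlay]
  simp only [pvFillFrom, List.drop_one, List.tail_cons, List.nil_append, List.foldl_cons,
    List.foldl_nil]
  have h02 : PySem.Int.mod 0 2 = 0 := by
    rw [PySem.Int.mod_eq_emod_of_pos (b := 2) (by norm_num) (a := 0)]
    rfl
  rw [h02]

-- ===== VERDICT (by name: the statement is the Claim_ definition above) =====
theorem bfs_spec : Claim_equal_bfs := by
  intro graph startVertex _ _
  unfold Spec_bfs
  exact bfs_eq graph startVertex
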